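-- pv_equiv track=rewrite | github.com/DanielGDonskoi/2xb3-Rupen-Daniel-Javid | code.py | are_valid_groups
-- ===== SOURCE A (Python) =====
-- def are_valid_groups(students, groups):
--
--         newstudents = []
--         for student in students:
--                 newstudents.append(str(student))
--         students = newstudents
--
--         newgroups = []
--         for group in groups:
--                 newgroup = []
--                 for student in group:
--                         newgroup.append(str(student))
--                 newgroups.append(newgroup)
--         groups = newgroups
--
--
--         for group in groups:
--                 if len(group) < 2 or len(group) > 3:
--                         return False
--
--         usedstudents = []
--         for group in groups:
--                 for student in group:
--                         if student in usedstudents: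
--                                 return False
--                         elif student not in students:
--                                 return False
--                         elif student in students:
--                                 students.remove(student)
--                                 usedstudents.append(student)
--         if not students:
--                 return True
--         else:
--                 return False
-- ===== SOURCE B (Python) =====
-- def are_valid_groups(students, groups):
--     students = [str(s) for s in students]
--     groups = [[str(m) for m in g] for g in groups]
--     if any(len(g) not in (2, 3) for g in groups):
--         return False
--     flat = [m for g in groups for m in g]
--     return len(flat) == len(set(flat)) and sorted(flat) == sorted(students)
-- ===== Notes on version B (the rewrite author's own statement) =====
-- stated objective: simpler
-- what changed: Replaces A's stateful element-by-element scan (remove from a shrinking students list, track used members, three early returns) by a whole-list check: flatten all groups and test no-duplicates via set size plus multiset equality via sorted comparison.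
import Mathlib
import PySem

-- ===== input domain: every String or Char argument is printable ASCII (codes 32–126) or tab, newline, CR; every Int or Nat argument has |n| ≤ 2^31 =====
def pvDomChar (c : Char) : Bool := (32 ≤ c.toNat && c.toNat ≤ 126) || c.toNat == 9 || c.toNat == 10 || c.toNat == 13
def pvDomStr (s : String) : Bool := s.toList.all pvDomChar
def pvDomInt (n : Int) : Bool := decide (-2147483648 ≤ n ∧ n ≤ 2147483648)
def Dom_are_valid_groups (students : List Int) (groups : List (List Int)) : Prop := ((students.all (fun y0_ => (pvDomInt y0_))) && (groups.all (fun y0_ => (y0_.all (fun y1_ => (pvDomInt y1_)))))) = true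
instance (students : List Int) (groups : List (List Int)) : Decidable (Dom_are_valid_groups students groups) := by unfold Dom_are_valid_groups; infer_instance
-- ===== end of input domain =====

-- B replaces A's stateful remove/used-tracking scan by a flatten + set-size duplicate check
-- + sorted-comparison multiset test (objective: simpler). Return value only; neither mutates its arguments.

-- ===== PORT A =====
-- inner 'for student in group' loop: state = (remaining students, usedstudents); none = early 'return False'
def avgInner (students used : List String) (group : List String) : Option (List String × List String) :=
  match group with
  | [] => some (students, used)
  | s :: rest =>
    if s ∈ used then none
    else if s ∉ students then none
    else
      -- the branch guarantees s ∈ students, so students.remove(s) cannot raise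
      avgInner ((PySem.List.remove? students s).getD students) (used ++ [s]) rest

-- outer 'for group in groups' loop around avgInner
def avgOuter (students used : List String) (groups : List (List String)) : Option (List String) :=
  match groups with
  | [] => some students
  | g :: gs =>
    match avgInner students used g with
    | none => none
    | some (st, us) => avgOuter st us gs

def are_valid_groups (students : List Int) (groups : List (List Int)) : Bool :=
  let newstudents := students.foldl (fun acc s => acc ++ [PySem.Int.toStr s]) []
  let newgroups := groups.foldl (fun acc g => acc ++ [g.foldl (fun ng s => ng ++ [PySem.Int.toStr s]) []]) []
  if newgroups.any (fun g => g.length < 2 || g.length > 3) then false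
  else
    match avgOuter newstudents [] newgroups with
    | none => false
    | some st => decide (st = [])

-- ===== PORT B =====
def are_valid_groups_alt (students : List Int) (groups : List (List Int)) : Bool :=
  let students := students.map PySem.Int.toStr
  let groups := groups.map (fun g => g.map PySem.Int.toStr)
  if groups.any (fun g => g.length ≠ 2 && g.length ≠ 3) then false
  else
    let flat := groups.flatMap (fun g => g)
    decide (flat.length = (PySem.Set.ofList flat).length) &&
      decide (PySem.List.sorted flat (fun x => x) false = PySem.List.sorted students (fun x => x) false)

-- ===== PRECONDITION & SPEC =====
def Spec_are_valid_groups (students : List Int) (groups : List (List Int)) (out : Bool) : Prop := out = are_valid_groups_alt students groups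
instance (students : List Int) (groups : List (List Int)) (out : Bool) : Decidable (Spec_are_valid_groups students groups out) := by unfold Spec_are_valid_groups; infer_instance

-- ===== CLAIM (what is proved, stated in full; the proofs are below) =====
def Claim_equal_are_valid_groups : Prop := ∀ (students : List Int) (groups : List (List Int)), Dom_are_valid_groups students groups → Spec_are_valid_groups students groups (are_valid_groups students groups)

-- ===== LEMMAS AND PROOFS =====

-- set(xs) keeps first occurrences: it is a sublist of xs
theorem foldl_add_sublist (t : List String) : ∀ s : List String,
    List.Sublist (t.foldl PySem.Set.add s) (s ++ t) := by
  induction t with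
  | nil => intro s; simp
  | cons y t ih =>
    intro s
    rw [List.foldl_cons]
    by_cases hy : PySem.Set.contains s y = true
    · have hymem : y ∈ s := by simpa [PySem.Set.contains] using hy
      have hadd : PySem.Set.add s y = s := by simp [PySem.Set.add, PySem.Set.contains, hymem]
      rw [hadd]
      exact (ih s).trans (List.Sublist.append_left ((List.sublist_cons_self y t)) s)
    · have hymem : y ∉ s := fun hm => hy (by simp [PySem.Set.contains, hm])
      have hadd : PySem.Set.add s y = s ++ [y] := by simp [PySem.Set.add, PySem.Set.contains, hymem]
      rw [hadd]
      have := ih (s ++ [y])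
      rwa [List.append_assoc] at this

-- set-size duplicate test names Nodup
theorem length_ofList_eq_iff_nodup (xs : List String) :
    xs.length = (PySem.Set.ofList xs).length ↔ xs.Nodup := by
  constructor
  · intro h
    have hsub : List.Sublist (PySem.Set.ofList xs) xs := by
      have := foldl_add_sublist xs []
      simpa [PySem.Set.ofList] using this
    have heq : PySem.Set.ofList xs = xs := hsub.eq_of_length h.symm
    have := PySem.Set.nodup_ofList (xs := xs)
    rwa [heq] at this
  · intro h
    rw [PySem.Set.ofList_eq_self_of_nodup xs h]

-- characterisation of A's inner scan, run on the flattened member list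
theorem avgInner_char (l : List String) : ∀ (st used : List String),
    ((avgInner st used l).map Prod.fst = some []) ↔
      (l.Nodup ∧ (∀ x ∈ l, x ∉ used) ∧ st.Perm l) := by
  induction l with
  | nil =>
    intro st used
    simp only [avgInner, Option.map_some, Option.some.injEq, List.nodup_nil, true_and,
      List.not_mem_nil, false_implies, implies_true]
    constructor
    · rintro rfl; exact List.Perm.refl []
    · intro h; exact h.eq_nil
  | cons s rest ih =>
    intro st used
    simp only [avgInner]
    by_cases hu : s ∈ used
    · rw [if_pos hu]
      constructor
      · intro h; simp at h
      · rintro ⟨_, hnu, _⟩; exact absurd hu (hnu s (by simp))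
    · rw [if_neg hu]
      by_cases hs : s ∈ st
      · rw [if_neg (not_not_intro hs), PySem.List.remove?_eq_some_erase st s hs, Option.getD_some, ih]
        constructor
        · rintro ⟨hnd, hnotused, hperm⟩
          refine ⟨List.Nodup.cons (fun hsr => (hnotused s hsr (by simp)).elim) hnd, ?_, ?_⟩
          · intro x hx hxu
            rcases List.mem_cons.1 hx with rfl | hx
            · exact hu hxu
            · exact hnotused x hx (by simp [hxu])
          · exact ((List.cons_perm_iff_perm_erase).2 ⟨hs, hperm.symm⟩).symm
        · rintro ⟨hnd, hnotused, hperm⟩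
          rcases List.nodup_cons.1 hnd with ⟨hsr, hnd2⟩
          refine ⟨hnd2, ?_, ?_⟩
          · intro x hx
            simp only [List.mem_append, List.mem_singleton]
            rintro (hxu | rfl)
            · exact hnotused x (by simp [hx]) hxu
            · exact hsr hx
          · exact ((List.cons_perm_iff_perm_erase).1 hperm.symm).2.symm
      · rw [if_pos hs]
        constructor
        · intro h; simp at h
        · rintro ⟨_, _, hperm⟩; exact absurd (hperm.mem_iff.2 (by simp)) hs

-- the nested outer/inner loops equal one inner scan over the flattened groups
theorem avgInner_append (a : List String) : ∀ (b s u : List String),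
    avgInner s u (a ++ b) = (avgInner s u a).bind (fun p => avgInner p.1 p.2 b) := by
  induction a with
  | nil => intro b s u; simp [avgInner]
  | cons x t iha =>
    intro b s u
    rw [List.cons_append]
    simp only [avgInner]
    by_cases h1 : x ∈ u
    · rw [if_pos h1, if_pos h1]; rfl
    · rw [if_neg h1, if_neg h1]
      by_cases h2 : x ∈ s
      · rw [if_neg (not_not_intro h2), if_neg (not_not_intro h2)]
        exact iha b _ _
      · rw [if_pos h2, if_pos h2]; rfl

theorem avgOuter_eq_flat (gs : List (List String)) : ∀ (st used : List String),
    avgOuter st used gs = (avgInner st used (gs.flatMap (fun g => g))).map Prod.fst := by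
  induction gs with
  | nil => intro st used; simp [avgOuter, avgInner]
  | cons g rest ih =>
    intro st used
    rw [avgOuter, List.flatMap_cons, avgInner_append]
    cases h : avgInner st used g with
    | none => simp
    | some p => simp [ih p.1 p.2]

-- the whole comparison, after both ports have converted everything to strings
theorem ports_eq_str (ss : List String) (gg : List (List String)) :
    (if gg.any (fun g => g.length < 2 || g.length > 3) then false
     else match avgOuter ss [] gg with | none => false | some st => decide (st = []))
    = (if gg.any (fun g => g.length ≠ 2 && g.length ≠ 3) then false
       else decide ((gg.flatMap (fun g => g)).length = (PySem.Set.ofList (gg.flatMap (fun g => g))).length)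
            && decide (PySem.List.sorted (gg.flatMap (fun g => g)) (fun x => x) false = PySem.List.sorted ss (fun x => x) false)) := by
  have hfun : ∀ g : List String,
      (decide (g.length < 2) || decide (g.length > 3)) = (decide (g.length ≠ 2) && decide (g.length ≠ 3)) := by
    intro g
    by_cases h2 : g.length = 2
    · simp [h2]
    · by_cases h3 : g.length = 3
      · simp [h3]
      · have : g.length < 2 ∨ g.length > 3 := by omega
        rcases this with h | h <;> simp [h2, h3] <;> omega
  have hsz : (gg.any (fun g => decide (g.length < 2) || decide (g.length > 3)))
      = (gg.any (fun g => decide (g.length ≠ 2) && decide (g.length ≠ 3))) :=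
    List.any_congr rfl hfun
  simp only [gt_iff_lt] at hsz ⊢
  rw [hsz]
  by_cases hbad : gg.any (fun g => decide (g.length ≠ 2) && decide (g.length ≠ 3)) = true
  · rw [if_pos hbad, if_pos hbad]
  · rw [if_neg hbad, if_neg hbad, avgOuter_eq_flat]
    have hchar := avgInner_char (gg.flatMap (fun g => g)) ss []
    simp only [List.not_mem_nil, not_false_iff, implies_true, true_and] at hchar
    have hR : (decide ((gg.flatMap (fun g => g)).length = (PySem.Set.ofList (gg.flatMap (fun g => g))).length)
            && decide (PySem.List.sorted (gg.flatMap (fun g => g)) (fun x => x) false = PySem.List.sorted ss (fun x => x) false))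
        = decide ((gg.flatMap (fun g => g)).Nodup ∧ ss.Perm (gg.flatMap (fun g => g))) := by
      rw [Bool.decide_and]
      congr 1
      · exact decide_eq_decide.2 (length_ofList_eq_iff_nodup _)
      · refine decide_eq_decide.2 ?_
        rw [PySem.List.sorted_id_eq_sorted_id_iff_perm]
        exact ⟨fun h => h.symm, fun h => h.symm⟩
    rw [hR]
    cases h : (avgInner ss [] (gg.flatMap (fun g => g))).map Prod.fst with
    | none =>
      have hne : ¬ ((gg.flatMap (fun g => g)).Nodup ∧ ss.Perm (gg.flatMap (fun g => g))) := by
        intro hc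
        have := hchar.2 ⟨hc.1, hc.2⟩
        rw [h] at this
        simp at this
      symm
      rw [decide_eq_false_iff_not]
      exact hne
    | some st =>
      have hiff : (st = []) ↔ ((gg.flatMap (fun g => g)).Nodup ∧ ss.Perm (gg.flatMap (fun g => g))) := by
        rw [← hchar, h, Option.some.injEq]
      exact decide_eq_decide.2 hiff

-- ===== VERDICT (by name: the statement is the Claim_ definition above) =====
theorem are_valid_groups_spec : Claim_equal_are_valid_groups := by
  intro students groups _
  unfold Spec_are_valid_groups are_valid_groups are_valid_groups_alt
  have hinner : ∀ g : List Int, g.foldl (fun ng s => ng ++ [PySem.Int.toStr s]) []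
      = g.map PySem.Int.toStr := by
    intro g
    rw [PySem.List.foldl_append_singleton_eq_map, List.nil_append]
  have hss : students.foldl (fun acc s => acc ++ [PySem.Int.toStr s]) []
      = students.map PySem.Int.toStr := by
    rw [PySem.List.foldl_append_singleton_eq_map, List.nil_append]
  have hgg : groups.foldl (fun acc g => acc ++ [g.foldl (fun ng s => ng ++ [PySem.Int.toStr s]) []]) []
      = groups.map (fun g => g.map PySem.Int.toStr) := by
    rw [PySem.List.foldl_append_singleton_eq_map, List.nil_append]
    exact List.map_congr_left (fun g _ => hinner g)
  simp only [hss, hgg]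
  exact ports_eq_str (students.map PySem.Int.toStr) (groups.map (fun g => g.map PySem.Int.toStr))
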